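-- pv_equiv track=rewrite | github.com/jsolemd/SoleMD.Graph | engine/app/graph/repository.py | split_graph_lookup_refs
-- ===== SOURCE A (Python) =====
-- from collections.abc import Callable, Sequence
--
-- def split_graph_lookup_refs(values: Sequence[str]) -> tuple[list[int], list[str]]:
--     corpus_ids: list[int] = []
--     graph_paper_refs: list[str] = []
--     seen_corpus_ids: set[int] = set()
--     seen_graph_paper_refs: set[str] = set()
--
--     for raw_value in values:
--         value = raw_value.strip()
--         if not value:
--             continue
--
--         if value.startswith("paper:"):
--             suffix = value.split(":", 1)[1].strip()
--             if suffix.isdigit():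
--                 corpus_id = int(suffix)
--                 if corpus_id not in seen_corpus_ids:
--                     seen_corpus_ids.add(corpus_id)
--                     corpus_ids.append(corpus_id)
--                 continue
--             value = suffix
--         elif value.startswith("corpus:"):
--             suffix = value.split(":", 1)[1].strip()
--             if suffix.isdigit():
--                 corpus_id = int(suffix)
--                 if corpus_id not in seen_corpus_ids:
--                     seen_corpus_ids.add(corpus_id)
--                     corpus_ids.append(corpus_id)
--             continue
--         elif value.isdigit():
--             corpus_id = int(value)
--             if corpus_id not in seen_corpus_ids:
--                 seen_corpus_ids.add(corpus_id)
--                 corpus_ids.append(corpus_id)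
--             continue
--
--         if value and value not in seen_graph_paper_refs:
--             seen_graph_paper_refs.add(value)
--             graph_paper_refs.append(value)
--
--     return corpus_ids, graph_paper_refs
-- ===== SOURCE B (Python) =====
-- def _classify(raw_value):
--     """Pure classifier: None (drop), ('id', n) or ('ref', s) for one raw value."""
--     value = raw_value.strip()
--     if not value:
--         return None
--     if value.startswith("paper:") or value.startswith("corpus:"):
--         suffix = value.split(":", 1)[1].strip()
--         if suffix.isdigit():
--             return ("id", int(suffix))
--         if value.startswith("paper:") and suffix:
--             return ("ref", suffix)
--         return None
--     if value.isdigit():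
--         return ("id", int(value))
--     return ("ref", value)
--
--
-- def split_graph_lookup_refs(values):
--     # map to a tagged token stream, keep first occurrences by index/prefix scan,
--     # then partition by tag.
--     tokens = [t for t in map(_classify, values) if t is not None]
--     uniq = [t for i, t in enumerate(tokens) if t not in tokens[:i]]
--     return ([v for k, v in uniq if k == "id"], [v for k, v in uniq if k == "ref"])
-- ===== Notes on version B (the rewrite author's own statement) =====
-- stated objective: alternative
-- what changed: B replaces A's stateful single pass with two seen-sets by a pure classifier mapped over the input to a tagged token stream, first-occurrence dedup via an enumerate/prefix-slice scan, and a final partition of the deduped tokens by tag.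
import Mathlib
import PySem

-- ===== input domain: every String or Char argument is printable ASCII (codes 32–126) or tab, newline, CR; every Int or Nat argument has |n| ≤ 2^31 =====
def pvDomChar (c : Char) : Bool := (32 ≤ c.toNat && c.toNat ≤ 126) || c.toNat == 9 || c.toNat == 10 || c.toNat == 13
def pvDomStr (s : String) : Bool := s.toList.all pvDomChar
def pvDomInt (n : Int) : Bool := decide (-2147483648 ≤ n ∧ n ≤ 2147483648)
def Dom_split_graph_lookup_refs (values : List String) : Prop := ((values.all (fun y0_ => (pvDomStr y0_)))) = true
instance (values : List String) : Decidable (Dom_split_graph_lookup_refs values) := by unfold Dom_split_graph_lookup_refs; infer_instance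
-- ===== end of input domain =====

-- B replaces A's stateful pass with two seen-sets by a pure classifier mapped to a tagged
-- token stream, an enumerate/prefix-slice first-occurrence dedup, and a partition by tag.

-- ===== PORT A =====
-- per-iteration body of A's for-loop; state = (corpus_ids, graph_paper_refs, seen_corpus_ids, seen_graph_paper_refs).
-- value.split(":", 1)[1] is ported with a default "" (the index always exists when value starts with "paper:"/"corpus:");
-- int(suffix) is ported as (PySem.Int.ofStr? suffix).getD 0 (never none on an isdigit string in the ASCII domain).
def pvAStep (st : List Int × List String × PySem.Set Int × PySem.Set String) (raw_value : String) :
    List Int × List String × PySem.Set Int × PySem.Set String :=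
  let (corpus_ids, graph_paper_refs, seen_corpus_ids, seen_graph_paper_refs) := st
  let value := PySem.Str.strip raw_value
  if value = "" then st
  else if PySem.Str.startswith value "paper:" then
    let suffix := PySem.Str.strip (((PySem.Str.splitMax? value ":" 1).getD []).getD 1 "")
    if PySem.Str.strIsdigit suffix then
      let corpus_id := (PySem.Int.ofStr? suffix).getD 0
      if PySem.Set.contains seen_corpus_ids corpus_id then st
      else (corpus_ids ++ [corpus_id], graph_paper_refs, PySem.Set.add seen_corpus_ids corpus_id, seen_graph_paper_refs)
    else -- value = suffix, then the trailing 'if value and value not in seen_graph_paper_refs' block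
      if suffix ≠ "" ∧ ¬ PySem.Set.contains seen_graph_paper_refs suffix then
        (corpus_ids, graph_paper_refs ++ [suffix], seen_corpus_ids, PySem.Set.add seen_graph_paper_refs suffix)
      else st
  else if PySem.Str.startswith value "corpus:" then
    let suffix := PySem.Str.strip (((PySem.Str.splitMax? value ":" 1).getD []).getD 1 "")
    if PySem.Str.strIsdigit suffix then
      let corpus_id := (PySem.Int.ofStr? suffix).getD 0
      if PySem.Set.contains seen_corpus_ids corpus_id then st
      else (corpus_ids ++ [corpus_id], graph_paper_refs, PySem.Set.add seen_corpus_ids corpus_id, seen_graph_paper_refs)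
    else st
  else if PySem.Str.strIsdigit value then
    let corpus_id := (PySem.Int.ofStr? value).getD 0
    if PySem.Set.contains seen_corpus_ids corpus_id then st
    else (corpus_ids ++ [corpus_id], graph_paper_refs, PySem.Set.add seen_corpus_ids corpus_id, seen_graph_paper_refs)
  else -- trailing 'if value and value not in seen_graph_paper_refs' block
    if value ≠ "" ∧ ¬ PySem.Set.contains seen_graph_paper_refs value then
      (corpus_ids, graph_paper_refs ++ [value], seen_corpus_ids, PySem.Set.add seen_graph_paper_refs value)
    else st

def split_graph_lookup_refs (values : List String) : List Int × List String :=
  let st := values.foldl pvAStep ([], [], PySem.Set.empty, PySem.Set.empty)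
  (st.1, st.2.1)

-- ===== PORT B =====
-- Source B's tokens ('id', n) / ('ref', s) are ported as Sum.inl n / Sum.inr s (tag = constructor).
-- pvClassify is Source B's _classify, step for step.
def pvClassify (raw_value : String) : Option (Sum Int String) :=
  let value := PySem.Str.strip raw_value
  if value = "" then none
  else if PySem.Str.startswith value "paper:" ∨ PySem.Str.startswith value "corpus:" then
    let suffix := PySem.Str.strip (((PySem.Str.splitMax? value ":" 1).getD []).getD 1 "")
    if PySem.Str.strIsdigit suffix then some (Sum.inl ((PySem.Int.ofStr? suffix).getD 0))
    else if PySem.Str.startswith value "paper:" ∧ suffix ≠ "" then some (Sum.inr suffix)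
    else none
  else if PySem.Str.strIsdigit value then some (Sum.inl ((PySem.Int.ofStr? value).getD 0))
  else some (Sum.inr value)

-- boolean membership test used for Source B's 'in' checks on token lists
def pvMem (x : Sum Int String) (l : List (Sum Int String)) : Bool := l.any (fun y => decide (y = x))

-- extractors for the partition comprehensions '[v for k, v in uniq if k == "id"/"ref"]'
def pvInl? (t : Sum Int String) : Option Int := match t with | Sum.inl n => some n | Sum.inr _ => none
def pvInr? (t : Sum Int String) : Option String := match t with | Sum.inl _ => none | Sum.inr s => some s

def split_graph_lookup_refs_alt (values : List String) : List Int × List String :=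
  -- tokens = [t for t in map(_classify, values) if t is not None]
  let tokens := (values.map pvClassify).filterMap id
  -- uniq = [t for i, t in enumerate(tokens) if t not in tokens[:i]]
  let uniq := ((PySem.List.enumerate tokens).filter
      (fun p => !(pvMem p.2 (PySem.List.slice tokens none (some p.1))))).map Prod.snd
  (uniq.filterMap pvInl?, uniq.filterMap pvInr?)

-- ===== PRECONDITION & SPEC =====
def Spec_split_graph_lookup_refs (values : List String) (out : List Int × List String) : Prop := out = split_graph_lookup_refs_alt values
instance (values : List String) (out : List Int × List String) : Decidable (Spec_split_graph_lookup_refs values out) := by unfold Spec_split_graph_lookup_refs; infer_instance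

-- ===== CLAIM (what is proved, stated in full; the proofs are below) =====
def Claim_equal_split_graph_lookup_refs : Prop := ∀ (values : List String), Dom_split_graph_lookup_refs values → Spec_split_graph_lookup_refs values (split_graph_lookup_refs values)

-- ===== LEMMAS AND PROOFS =====

theorem pvMem_iff (x : Sum Int String) (l : List (Sum Int String)) :
    pvMem x l = true ↔ x ∈ l := by
  simp [pvMem]

theorem pvMem_true (x : Sum Int String) (l : List (Sum Int String)) (h : x ∈ l) :
    pvMem x l = true := (pvMem_iff x l).2 h

theorem pvMem_false (x : Sum Int String) (l : List (Sum Int String)) (h : x ∉ l) :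
    pvMem x l = false := by
  cases hb : pvMem x l with
  | false => rfl
  | true => exact absurd ((pvMem_iff x l).1 hb) h

-- reduced A-step on the (ids, refs) pair, driven by one classified token
def pvStepT (st : List Int × List String) (t : Sum Int String) : List Int × List String :=
  match t with
  | Sum.inl n => if n ∈ st.1 then st else (st.1 ++ [n], st.2)
  | Sum.inr s => if s ∈ st.2 then st else (st.1, st.2 ++ [s])

def pvStep2 (st : List Int × List String) (o : Option (Sum Int String)) : List Int × List String :=
  match o with
  | none => st
  | some t => pvStepT st t

-- first-occurrence dedup step and the partition of a token list
def pvDStep (acc : List (Sum Int String)) (t : Sum Int String) : List (Sum Int String) :=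
  if pvMem t acc then acc else acc ++ [t]

def pvSplitTok (u : List (Sum Int String)) : List Int × List String :=
  (u.filterMap pvInl?, u.filterMap pvInr?)

-- L1: one A-step on a diagonal state is the classified-token step
theorem pvAStep_diag (p : List Int) (q : List String) (v : String) :
    pvAStep (p, q, p, q) v =
      ((pvStep2 (p, q) (pvClassify v)).1, (pvStep2 (p, q) (pvClassify v)).2,
       (pvStep2 (p, q) (pvClassify v)).1, (pvStep2 (p, q) (pvClassify v)).2) := by
  simp only [pvAStep, pvClassify, pvStep2, pvStepT]
  split_ifs <;> simp_all [PySem.Set.add, PySem.Set.contains]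

-- L2: A's fold from a diagonal state mirrors the reduced fold over classified tokens
theorem pvAFold_diag (values : List String) (p : List Int) (q : List String) :
    values.foldl pvAStep (p, q, p, q) =
      (((values.map pvClassify).foldl pvStep2 (p, q)).1,
       ((values.map pvClassify).foldl pvStep2 (p, q)).2,
       ((values.map pvClassify).foldl pvStep2 (p, q)).1,
       ((values.map pvClassify).foldl pvStep2 (p, q)).2) := by
  induction values generalizing p q with
  | nil => rfl
  | cons v t ih =>
    simp only [List.foldl_cons, List.map_cons, pvAStep_diag]
    rw [ih]

-- L3: skipping the none tokens
theorem pvFold_step2_filterMap (os : List (Option (Sum Int String))) (st : List Int × List String) :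
    os.foldl pvStep2 st = (os.filterMap id).foldl pvStepT st := by
  induction os generalizing st with
  | nil => rfl
  | cons o t ih =>
    cases o <;> simp [pvStep2, ih]

-- membership through the dedup fold
theorem pv_mem_dfold (l : List (Sum Int String)) (acc : List (Sum Int String)) (x : Sum Int String) :
    x ∈ l.foldl pvDStep acc ↔ x ∈ acc ∨ x ∈ l := by
  induction l generalizing acc with
  | nil => simp
  | cons t r ih =>
    by_cases h : t ∈ acc
    · simp only [List.foldl_cons, pvDStep, pvMem_true t acc h, if_true, ih, List.mem_cons]
      constructor
      · rintro (hx | hx) <;> tauto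
      · rintro (hx | hx | hx) <;> subst_eqs <;> tauto
    · simp only [List.foldl_cons, pvDStep, pvMem_false t acc h, Bool.false_eq_true, if_false, ih,
        List.mem_append, List.mem_cons]
      constructor
      · rintro ((hx | hx) | hx) <;> simp_all
      · rintro (hx | hx | hx) <;> simp_all

-- L4: the enumerate/prefix-slice first-occurrence filter equals the dedup fold
theorem pvUniq_eq_dfold (l : List (Sum Int String)) :
    ((PySem.List.enumerate l).filter
        (fun p => !(pvMem p.2 (PySem.List.slice l none (some p.1))))).map Prod.snd =
      l.foldl pvDStep [] := by
  induction l using List.reverseRecOn with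
  | nil => rfl
  | append_singleton l t ih =>
    rw [List.foldl_append]
    have henum : PySem.List.enumerate (l ++ [t]) 0
        = PySem.List.enumerate l 0 ++ [((l.length : Int), t)] := by
      rw [PySem.List.enumerate_append]
      simp [PySem.List.enumerate]
    have hfl : ∀ p ∈ PySem.List.enumerate l 0,
        (!(pvMem p.2 (PySem.List.slice (l ++ [t]) none (some p.1))))
          = (!(pvMem p.2 (PySem.List.slice l none (some p.1)))) := by
      intro p hp
      rcases (PySem.List.mem_enumerate_iff l 0 p).1 hp with ⟨k, hk, rfl⟩
      simp only [zero_add]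
      rw [PySem.List.slice_to_natCast, PySem.List.slice_to_natCast,
          List.take_append_of_le_length (Nat.le_of_lt hk)]
    have hmf : t ∈ l.foldl pvDStep [] ↔ t ∈ l := by
      rw [pv_mem_dfold]; simp
    have hlast : PySem.List.slice (l ++ [t]) none (some ((l.length : Int))) = l := by
      rw [PySem.List.slice_to_natCast]
      simp
    rw [henum, List.filter_append, List.filter_congr hfl, List.map_append, ih]
    by_cases ht : t ∈ l
    · simp [hlast, pvDStep, pvMem_true t l ht, pvMem_true t _ (hmf.2 ht)]
    · simp [hlast, pvDStep, pvMem_false t l ht, pvMem_false t _ (fun h => ht (hmf.1 h))]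

-- L5: the reduced token fold is the partition of the dedup fold
theorem pvFold_stepT_split (toks : List (Sum Int String)) (u : List (Sum Int String)) :
    toks.foldl pvStepT (pvSplitTok u) = pvSplitTok (toks.foldl pvDStep u) := by
  induction toks generalizing u with
  | nil => rfl
  | cons t r ih =>
    have hstep : pvStepT (pvSplitTok u) t = pvSplitTok (pvDStep u t) := by
      cases t with
      | inl n =>
        by_cases h : Sum.inl n ∈ u
        · have hm : n ∈ u.filterMap pvInl? := by
            simp only [List.mem_filterMap]; exact ⟨Sum.inl n, h, rfl⟩
          simp [pvStepT, pvSplitTok, pvDStep, pvMem_true _ u h, hm]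
        · simp [pvStepT, pvSplitTok, pvDStep, pvMem_false _ u h, pvInl?, pvInr?, h]
      | inr s =>
        by_cases h : Sum.inr s ∈ u
        · have hm : s ∈ u.filterMap pvInr? := by
            simp only [List.mem_filterMap]; exact ⟨Sum.inr s, h, rfl⟩
          simp [pvStepT, pvSplitTok, pvDStep, pvMem_true _ u h, hm]
        · simp [pvStepT, pvSplitTok, pvDStep, pvMem_false _ u h, pvInl?, pvInr?, h]
    simp only [List.foldl_cons, hstep, ih]

-- ===== VERDICT (by name: the statement is the Claim_ definition above) =====
theorem split_graph_lookup_refs_spec : Claim_equal_split_graph_lookup_refs := by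
  intro values _
  unfold Spec_split_graph_lookup_refs
  simp only [split_graph_lookup_refs, split_graph_lookup_refs_alt]
  rw [show (PySem.Set.empty : PySem.Set Int) = ([] : List Int) from rfl,
      show (PySem.Set.empty : PySem.Set String) = ([] : List String) from rfl]
  rw [pvAFold_diag, pvFold_step2_filterMap,
      show (([], []) : List Int × List String) = pvSplitTok [] from rfl,
      pvFold_stepT_split, pvUniq_eq_dfold]
  rfl
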